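-- pv_equiv track=rewrite | github.com/BaNburger/initiativescout | archive/initiative_tracker/pipeline/scrape_directories.py | _category_market_hints
-- ===== SOURCE A (Python) =====
-- def _category_market_hints(categories: list[str]) -> list[str]:
--     hints: list[str] = []
--     for category in categories:
--         lower = category.casefold()
--         if "entrepreneur" in lower or "career" in lower:
--             hints.append("career_and_venture")
--         if "technology" in lower or "research" in lower:
--             hints.append("deep_tech")
--         if "sustainability" in lower or "health" in lower:
--             hints.append("sustainability_and_health")
--     return sorted(set(hints))
-- ===== SOURCE B (Python) =====
-- def _category_market_hints(categories: list[str]) -> list[str]: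
--     lowered = [c.casefold() for c in categories]
--     hints = set()
--     if any("entrepreneur" in c or "career" in c for c in lowered):
--         hints.add("career_and_venture")
--     if any("technology" in c or "research" in c for c in lowered):
--         hints.add("deep_tech")
--     if any("sustainability" in c or "health" in c for c in lowered):
--         hints.add("sustainability_and_health")
--     return sorted(hints)
-- ===== Notes on version B (the rewrite author's own statement) =====
-- stated objective: simpler
-- what changed: Replaces the single accumulating loop (append per category, then sorted(set(...))) by three independent short-circuiting any() rules over a once-casefolded list, each adding its tag to a set at most once; no dedup of an accumulated list is needed.
import Mathlib
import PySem

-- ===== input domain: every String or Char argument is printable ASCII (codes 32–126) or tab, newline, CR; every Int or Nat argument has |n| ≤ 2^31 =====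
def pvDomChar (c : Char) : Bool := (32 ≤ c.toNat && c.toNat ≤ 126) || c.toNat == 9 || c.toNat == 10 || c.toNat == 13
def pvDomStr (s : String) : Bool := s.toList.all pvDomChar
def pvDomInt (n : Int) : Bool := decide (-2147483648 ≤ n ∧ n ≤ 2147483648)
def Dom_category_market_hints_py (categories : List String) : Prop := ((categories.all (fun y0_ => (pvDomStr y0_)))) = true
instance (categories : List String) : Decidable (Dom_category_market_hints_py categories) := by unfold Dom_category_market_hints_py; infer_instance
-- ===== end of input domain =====

-- B replaces A's single accumulating loop by three independent any()-scans over the casefolded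
-- categories, each adding its tag to a set at most once (objective: simpler).


-- ===== PORT A =====
-- loop body of A (casefold is ported as PySem.Str.lower: exact on the ASCII domain)
def pvStepA (hints : List String) (category : String) : List String :=
  let lower := PySem.Str.lower category
  let hints := if PySem.Str.isIn "entrepreneur" lower || PySem.Str.isIn "career" lower
               then hints ++ ["career_and_venture"] else hints
  let hints := if PySem.Str.isIn "technology" lower || PySem.Str.isIn "research" lower
               then hints ++ ["deep_tech"] else hints
  if PySem.Str.isIn "sustainability" lower || PySem.Str.isIn "health" lower
  then hints ++ ["sustainability_and_health"] else hints

def category_market_hints_py (categories : List String) : List String :=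
  let hints := categories.foldl pvStepA []
  PySem.List.sorted (PySem.Set.ofList hints) (fun x => x) false

-- ===== PORT B =====
def category_market_hints_py_alt (categories : List String) : List String :=
  let lowered := categories.map PySem.Str.lower
  let hints : PySem.Set String := PySem.Set.empty
  let hints := if lowered.any (fun c => PySem.Str.isIn "entrepreneur" c || PySem.Str.isIn "career" c)
               then PySem.Set.add hints "career_and_venture" else hints
  let hints := if lowered.any (fun c => PySem.Str.isIn "technology" c || PySem.Str.isIn "research" c)
               then PySem.Set.add hints "deep_tech" else hints
  let hints := if lowered.any (fun c => PySem.Str.isIn "sustainability" c || PySem.Str.isIn "health" c)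
               then PySem.Set.add hints "sustainability_and_health" else hints
  PySem.List.sorted hints (fun x => x) false

-- ===== PRECONDITION & SPEC =====
def Spec_category_market_hints_py (categories : List String) (out : List String) : Prop := out = category_market_hints_py_alt categories
instance (categories : List String) (out : List String) : Decidable (Spec_category_market_hints_py categories out) := by unfold Spec_category_market_hints_py; infer_instance

-- ===== CLAIM (what is proved, stated in full; the proofs are below) =====
def Claim_equal_category_market_hints_py : Prop := ∀ (categories : List String), Dom_category_market_hints_py categories → Spec_category_market_hints_py categories (category_market_hints_py categories)

-- ===== LEMMAS AND PROOFS =====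

-- the three tag conditions, on an already-casefolded string
def pvC1 (c : String) : Bool := PySem.Str.isIn "entrepreneur" c || PySem.Str.isIn "career" c
def pvC2 (c : String) : Bool := PySem.Str.isIn "technology" c || PySem.Str.isIn "research" c
def pvC3 (c : String) : Bool := PySem.Str.isIn "sustainability" c || PySem.Str.isIn "health" c

-- membership characterisation of A's accumulated hints list
theorem mem_foldl_stepA (cs : List String) (acc : List String) (x : String) :
    x ∈ cs.foldl pvStepA acc ↔ x ∈ acc
      ∨ (x = "career_and_venture" ∧ ∃ c ∈ cs, pvC1 (PySem.Str.lower c))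
      ∨ (x = "deep_tech" ∧ ∃ c ∈ cs, pvC2 (PySem.Str.lower c))
      ∨ (x = "sustainability_and_health" ∧ ∃ c ∈ cs, pvC3 (PySem.Str.lower c)) := by
  induction cs generalizing acc with
  | nil => simp
  | cons c cs ih =>
    simp only [List.foldl_cons, ih, List.mem_cons]
    have hstep : x ∈ pvStepA acc c ↔ x ∈ acc
        ∨ (x = "career_and_venture" ∧ pvC1 (PySem.Str.lower c))
        ∨ (x = "deep_tech" ∧ pvC2 (PySem.Str.lower c))
        ∨ (x = "sustainability_and_health" ∧ pvC3 (PySem.Str.lower c)) := by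
      simp only [pvStepA, pvC1, pvC2, pvC3]
      split_ifs <;> simp_all
    rw [hstep]
    constructor <;> intro h <;> aesop

theorem category_market_hints_py_spec' (categories : List String) :
    category_market_hints_py categories = category_market_hints_py_alt categories := by
  unfold category_market_hints_py category_market_hints_py_alt
  apply PySem.List.sorted_eq_sorted_of_perm _ _ _ (fun a b h => h)
  have hnA : (PySem.Set.ofList (categories.foldl pvStepA [])).Nodup :=
    PySem.Set.nodup_ofList _
  have hany1 : (categories.map PySem.Str.lower).any (fun c => PySem.Str.isIn "entrepreneur" c || PySem.Str.isIn "career" c)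
      = decide (∃ c ∈ categories, pvC1 (PySem.Str.lower c)) := by
    rw [Bool.eq_iff_iff]
    simp [List.any_eq_true, pvC1]
  have hany2 : (categories.map PySem.Str.lower).any (fun c => PySem.Str.isIn "technology" c || PySem.Str.isIn "research" c)
      = decide (∃ c ∈ categories, pvC2 (PySem.Str.lower c)) := by
    rw [Bool.eq_iff_iff]
    simp [List.any_eq_true, pvC2]
  have hany3 : (categories.map PySem.Str.lower).any (fun c => PySem.Str.isIn "sustainability" c || PySem.Str.isIn "health" c)
      = decide (∃ c ∈ categories, pvC3 (PySem.Str.lower c)) := by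
    rw [Bool.eq_iff_iff]
    simp [List.any_eq_true, pvC3]
  rw [hany1, hany2, hany3]
  rw [List.perm_ext_iff_of_nodup hnA]
  · intro x
    rw [PySem.Set.mem_ofList, mem_foldl_stepA]
    by_cases h1 : ∃ c ∈ categories, pvC1 (PySem.Str.lower c) <;>
      by_cases h2 : ∃ c ∈ categories, pvC2 (PySem.Str.lower c) <;>
      by_cases h3 : ∃ c ∈ categories, pvC3 (PySem.Str.lower c) <;>
      simp [h1, h2, h3, PySem.Set.empty, PySem.Set.add, PySem.Set.contains]
  · by_cases h1 : ∃ c ∈ categories, pvC1 (PySem.Str.lower c) <;>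
      by_cases h2 : ∃ c ∈ categories, pvC2 (PySem.Str.lower c) <;>
      by_cases h3 : ∃ c ∈ categories, pvC3 (PySem.Str.lower c) <;>
      simp [h1, h2, h3, PySem.Set.empty, PySem.Set.add, PySem.Set.contains]

-- ===== VERDICT (by name: the statement is the Claim_ definition above) =====
theorem category_market_hints_py_spec : Claim_equal_category_market_hints_py := by
  intro categories _
  exact category_market_hints_py_spec' categories
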